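-- pv_equiv track=rewrite | github.com/ejstover/GreatMigration | backend/ssh_utils.py | _extract_command_output
-- ===== SOURCE A (Python) =====
-- def _extract_command_output(
--     raw_output: str,
--     host: str,
--     command: str,
--     prompt: str,
-- ) -> str:
--     normalized = _normalize_newlines(raw_output)
--     lines = normalized.split("\n")
--     prompt_clean = prompt.strip()
--     prompt_lower = prompt_clean.lower()
--     command_clean = command.strip()
--     command_lower = command_clean.lower()
--
--     output_lines: list[str] = []
--     command_seen = False
--
--     for line in lines:
--         stripped = line.strip()
--         lowered = stripped.lower()
--
--         if not command_seen:
--             if lowered == command_lower: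
--                 command_seen = True
--                 continue
--             if prompt_clean and lowered.startswith(prompt_lower):
--                 remainder = stripped[len(prompt_clean) :].strip()
--                 if remainder.lower() == command_lower:
--                     command_seen = True
--                     continue
--             if lowered.endswith(command_lower):
--                 command_seen = True
--                 continue
--             continue
--
--         if prompt_clean and stripped.startswith(prompt_clean):
--             break
--
--         output_lines.append(line)
--
--     return _normalize_newlines("\n".join(output_lines)).strip("\n")
--
-- def _normalize_newlines(value: str) -> str:
--     return value.replace("\r\n", "\n").replace("\r", "\n")
-- ===== SOURCE B (Python) =====
-- def _normalize_newlines(value: str) -> str: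
--     return value.replace("\r\n", "\n").replace("\r", "\n")
--
--
-- def _extract_command_output(
--     raw_output: str,
--     host: str,
--     command: str,
--     prompt: str,
-- ) -> str:
--     # Right fold (back-to-front pass) maintaining two candidate answers at once:
--     # `seen`    = the output that would be collected if the command had already been
--     #             seen just before this suffix (collect until a prompt line),
--     # `pending` = the final output for this suffix if the command has NOT yet been
--     #             seen (None until some line of the suffix matches the command).
--     # Processing lines right-to-left, a match overwrites `pending` with the current
--     # `seen`, so after the full pass `pending` reflects the FIRST (leftmost) match.
--     lines = _normalize_newlines(raw_output).split("\n")
--     prompt_clean = prompt.strip()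
--     prompt_lower = prompt_clean.lower()
--     command_lower = command.strip().lower()
--
--     pending = None
--     seen: list[str] = []
--     for line in reversed(lines):
--         stripped = line.strip()
--         lowered = stripped.lower()
--         is_cmd = (
--             lowered == command_lower
--             or (bool(prompt_clean)
--                 and lowered.startswith(prompt_lower)
--                 and stripped[len(prompt_clean):].strip().lower() == command_lower)
--             or lowered.endswith(command_lower)
--         )
--         if is_cmd:
--             pending = seen
--         if prompt_clean and stripped.startswith(prompt_clean):
--             seen = []
--         else:
--             seen = [line] + seen
--
--     if pending is None:
--         return ""
--     return _normalize_newlines("\n".join(pending)).strip("\n")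
-- ===== Notes on version B (the rewrite author's own statement) =====
-- stated objective: alternative
-- what changed: Replaced A's forward flag-driven state machine with a single back-to-front pass (a right fold) that maintains two candidate outputs per suffix - the collected output assuming the command was already seen, and the final output assuming it was not - so a command match simply promotes the former into the latter.
import Mathlib
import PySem

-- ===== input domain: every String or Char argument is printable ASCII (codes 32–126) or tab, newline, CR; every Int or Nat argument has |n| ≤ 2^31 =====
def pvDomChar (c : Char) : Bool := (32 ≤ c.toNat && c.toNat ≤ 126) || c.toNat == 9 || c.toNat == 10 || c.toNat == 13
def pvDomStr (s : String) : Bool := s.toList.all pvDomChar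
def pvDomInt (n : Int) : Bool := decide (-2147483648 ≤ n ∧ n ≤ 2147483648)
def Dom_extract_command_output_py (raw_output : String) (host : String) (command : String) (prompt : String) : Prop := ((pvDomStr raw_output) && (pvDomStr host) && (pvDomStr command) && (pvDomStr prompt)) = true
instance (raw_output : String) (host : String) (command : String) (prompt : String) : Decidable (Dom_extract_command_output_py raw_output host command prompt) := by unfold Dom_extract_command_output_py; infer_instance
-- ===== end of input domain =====

-- B replaces A's forward flag-driven state machine by a single back-to-front pass (right fold)
-- that carries two candidate outputs per suffix (objective: alternative; return values proved equal).

-- ===== PORT A =====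
-- _normalize_newlines: value.replace("\r\n", "\n").replace("\r", "\n")
def pvNorm (s : List Char) : List Char :=
  PySem.Chars.replace (PySem.Chars.replace s ['\r', '\n'] ['\n']) ['\r'] ['\n']

-- A's for-loop: state = (command_seen, output_lines); recursion over the lines, same branches in order.
def pvLoopA (pc pl cl : List Char) : List (List Char) → Bool → List (List Char)
  | [], _ => []
  | l :: rest, true =>
    if pc ≠ [] ∧ PySem.Chars.startswith (PySem.Chars.strip l) pc then []
    else l :: pvLoopA pc pl cl rest true
  | l :: rest, false =>
    let stripped := PySem.Chars.strip l
    let lowered := PySem.Chars.lower stripped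
    if lowered = cl then pvLoopA pc pl cl rest true
    else if pc ≠ [] ∧ PySem.Chars.startswith lowered pl ∧
            PySem.Chars.lower (PySem.Chars.strip
              (PySem.List.slice stripped (some (pc.length : Int)) none)) = cl then
      pvLoopA pc pl cl rest true
    else if PySem.Chars.endswith lowered cl then pvLoopA pc pl cl rest true
    else pvLoopA pc pl cl rest false

def extract_command_output_py (raw_output : String) (host : String) (command : String) (prompt : String) : String :=
  let normalized := pvNorm raw_output.toList
  let lines := PySem.Chars.splitOn normalized ['\n']
  let prompt_clean := PySem.Chars.strip prompt.toList
  let prompt_lower := PySem.Chars.lower prompt_clean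
  let command_lower := PySem.Chars.lower (PySem.Chars.strip command.toList)
  let output_lines := pvLoopA prompt_clean prompt_lower command_lower lines false
  String.ofList (PySem.Chars.stripChars (pvNorm (PySem.Chars.join ['\n'] output_lines)) ['\n'])

-- ===== PORT B =====
-- Source B's right fold over reversed(lines): for each suffix it returns the pair
-- (pending, seen) = (final output if the command was not yet seen: none until a match,
--                    output collected assuming the command was already seen).
-- Structural recursion consumes the list head-last like Python's reversed() iteration.
def pvFoldB (pc pl cl : List Char) : List (List Char) →
    Option (List (List Char)) × List (List Char)
  | [] => (none, [])
  | l :: rest =>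
    let p := pvFoldB pc pl cl rest
    let pending := p.1
    let seen := p.2
    let stripped := PySem.Chars.strip l
    let lowered := PySem.Chars.lower stripped
    let is_cmd := lowered = cl ∨
      (pc ≠ [] ∧ PySem.Chars.startswith lowered pl ∧
        PySem.Chars.lower (PySem.Chars.strip
          (PySem.List.slice stripped (some (pc.length : Int)) none)) = cl) ∨
      PySem.Chars.endswith lowered cl
    let pending' := if is_cmd then some seen else pending
    let seen' := if pc ≠ [] ∧ PySem.Chars.startswith stripped pc then [] else l :: seen
    (pending', seen')

def extract_command_output_py_alt (raw_output : String) (host : String) (command : String) (prompt : String) : String :=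
  let lines := PySem.Chars.splitOn (pvNorm raw_output.toList) ['\n']
  let prompt_clean := PySem.Chars.strip prompt.toList
  let prompt_lower := PySem.Chars.lower prompt_clean
  let command_lower := PySem.Chars.lower (PySem.Chars.strip command.toList)
  match (pvFoldB prompt_clean prompt_lower command_lower lines).1 with
  | none => ""
  | some pending =>
    String.ofList (PySem.Chars.stripChars (pvNorm (PySem.Chars.join ['\n'] pending)) ['\n'])

-- ===== PRECONDITION & SPEC =====
def Spec_extract_command_output_py (raw_output : String) (host : String) (command : String) (prompt : String) (out : String) : Prop := out = extract_command_output_py_alt raw_output host command prompt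
instance (raw_output : String) (host : String) (command : String) (prompt : String) (out : String) : Decidable (Spec_extract_command_output_py raw_output host command prompt out) := by unfold Spec_extract_command_output_py; infer_instance

-- ===== CLAIM (what is proved, stated in full; the proofs are below) =====
def Claim_equal_extract_command_output_py : Prop := ∀ (raw_output : String) (host : String) (command : String) (prompt : String), Dom_extract_command_output_py raw_output host command prompt → Spec_extract_command_output_py raw_output host command prompt (extract_command_output_py raw_output host command prompt)

-- ===== LEMMAS AND PROOFS =====
-- B's `seen` component is exactly A's loop with the flag set.
theorem pvFoldB_snd (pc pl cl : List Char) (lines : List (List Char)) :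
    (pvFoldB pc pl cl lines).2 = pvLoopA pc pl cl lines true := by
  induction lines with
  | nil => rfl
  | cons l rest ih =>
    simp only [pvFoldB, pvLoopA]
    by_cases h : pc ≠ [] ∧ PySem.Chars.startswith (PySem.Chars.strip l) pc = true
    · rw [if_pos h, if_pos h]
    · rw [if_neg h, if_neg h, ih]

-- B's `pending` component is exactly A's loop with the flag clear (none ↦ []).
theorem pvFoldB_fst (pc pl cl : List Char) (lines : List (List Char)) :
    (match (pvFoldB pc pl cl lines).1 with
      | none => ([] : List (List Char))
      | some pending => pending) = pvLoopA pc pl cl lines false := by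
  induction lines with
  | nil => rfl
  | cons l rest ih =>
    simp only [pvFoldB, pvLoopA]
    by_cases hc : PySem.Chars.lower (PySem.Chars.strip l) = cl ∨
        (pc ≠ [] ∧ PySem.Chars.startswith (PySem.Chars.lower (PySem.Chars.strip l)) pl ∧
          PySem.Chars.lower (PySem.Chars.strip
            (PySem.List.slice (PySem.Chars.strip l) (some (pc.length : Int)) none)) = cl) ∨
        PySem.Chars.endswith (PySem.Chars.lower (PySem.Chars.strip l)) cl
    · rw [if_pos hc]
      by_cases h1 : PySem.Chars.lower (PySem.Chars.strip l) = cl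
      · rw [if_pos h1]; exact pvFoldB_snd pc pl cl rest
      · rw [if_neg h1]
        by_cases h2 : pc ≠ [] ∧
            PySem.Chars.startswith (PySem.Chars.lower (PySem.Chars.strip l)) pl = true ∧
            PySem.Chars.lower (PySem.Chars.strip
              (PySem.List.slice (PySem.Chars.strip l) (some (pc.length : Int)) none)) = cl
        · rw [if_pos h2]; exact pvFoldB_snd pc pl cl rest
        · rw [if_neg h2]
          have h3 : PySem.Chars.endswith (PySem.Chars.lower (PySem.Chars.strip l)) cl = true := by
            tauto
          rw [if_pos h3]; exact pvFoldB_snd pc pl cl rest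
    · rw [if_neg hc]
      push_neg at hc
      obtain ⟨h1, h2, h3⟩ := hc
      rw [if_neg h1, if_neg (by tauto :
          ¬ (pc ≠ [] ∧ PySem.Chars.startswith (PySem.Chars.lower (PySem.Chars.strip l)) pl = true ∧
            PySem.Chars.lower (PySem.Chars.strip
              (PySem.List.slice (PySem.Chars.strip l) (some (pc.length : Int)) none)) = cl)),
        if_neg (by simpa using h3)]
      exact ih

-- ===== VERDICT (by name: the statement is the Claim_ definition above) =====
theorem extract_command_output_py_spec : Claim_equal_extract_command_output_py := by
  intro raw_output host command prompt _
  unfold Spec_extract_command_output_py extract_command_output_py extract_command_output_py_alt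
  simp only [← pvFoldB_fst]
  cases h : (pvFoldB (PySem.Chars.strip prompt.toList)
      (PySem.Chars.lower (PySem.Chars.strip prompt.toList))
      (PySem.Chars.lower (PySem.Chars.strip command.toList))
      (PySem.Chars.splitOn (pvNorm raw_output.toList) ['\n'])).1 with
  | none => rfl
  | some pending => simp
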